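-- pv_equiv track=rewrite | github.com/NamraKanabi/CSC_2022_Proj3 | assignment1.py | students_sort
-- ===== SOURCE A (Python) =====
-- def students_sort(students):
--     spliter=students.splitlines()
--     student_ID=[]
--     student_name=[]
--     classID=[]
--     student_dict={}
--     for x in spliter:
--         pause=0
--         temp_string=""
--         for y in range(len(x)):
--             if x[y]!=",":
--                 temp_string=temp_string+x[y]
--             elif x[y]=="," and pause==0:
--                 pause=1
--                 student_ID.append(temp_string)
--                 temp_string=""
--             elif x[y]=="," and pause==1:
--                 pause=2
--                 student_name.append(temp_string)
--                 temp_string=""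
--             if y+1==len(x) and pause==2:
--                 classID.append(temp_string)
--                 temp_string=""
--     for x in range(len(student_ID)):
--         student_dict[student_ID[x]]=student_name[x],classID[x]
--     return student_dict
-- ===== SOURCE B (Python) =====
-- def students_sort(students):
--     # Per line: split on ',' once; lines with fewer than two commas contribute nothing
--     # (a line with exactly one comma makes the original raise IndexError; excluded by Pre_).
--     student_dict = {}
--     for line in students.splitlines():
--         parts = line.split(',')
--         if len(parts) >= 3:
--             student_dict[parts[0]] = (parts[1], ''.join(parts[2:]))
--     return student_dict
-- ===== Notes on version B (the rewrite author's own statement) =====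
-- stated objective: simpler
-- what changed: Replaces the character-by-character pause/temp state machine plus three parallel lists and a final index-zip loop by a single pass that splits each line with str.split(',') and inserts directly into the dict.
-- outside the precondition, e.g. on students_sort(','): A raises IndexError, B returns {}
import Mathlib
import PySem

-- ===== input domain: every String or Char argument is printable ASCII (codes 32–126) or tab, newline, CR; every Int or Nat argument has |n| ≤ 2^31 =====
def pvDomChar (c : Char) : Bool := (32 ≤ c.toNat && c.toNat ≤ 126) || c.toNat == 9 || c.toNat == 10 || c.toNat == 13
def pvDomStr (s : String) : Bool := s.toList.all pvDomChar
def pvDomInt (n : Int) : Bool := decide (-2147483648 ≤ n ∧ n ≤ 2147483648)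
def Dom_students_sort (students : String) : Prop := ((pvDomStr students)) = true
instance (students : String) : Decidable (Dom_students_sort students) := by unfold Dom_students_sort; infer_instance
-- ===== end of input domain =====

-- B replaces A's character-level pause/temp state machine (three parallel lists zipped by a second
-- index loop) with a per-line split(',') inserted directly into the dict; same return value on Pre_.

-- ===== PORT A =====
-- inner 'for y in range(len(x))' loop of A; 'rest = []' is A's 'y+1 == len(x)' test
def students_sort_line (cs : List Char) (pause : Int) (temp : List Char)
    (ids names cls : List (List Char)) :
    List (List Char) × List (List Char) × List (List Char) :=
  match cs with
  | [] => (ids, names, cls)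
  | c :: rest =>
    let st :=
      if c ≠ ',' then (pause, temp ++ [c], ids, names)
      else if c = ',' ∧ pause = 0 then ((1 : Int), ([] : List Char), ids ++ [temp], names)
      else if c = ',' ∧ pause = 1 then ((2 : Int), ([] : List Char), ids, names ++ [temp])
      else (pause, temp, ids, names)
    if rest = [] ∧ st.1 = 2 then
      students_sort_line rest st.1 [] st.2.2.1 st.2.2.2 (cls ++ [st.2.1])
    else
      students_sort_line rest st.1 st.2.1 st.2.2.1 st.2.2.2 cls

def students_sort (students : String) : List (String × String × String) :=
  let spliter := PySem.Str.splitlines students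
  let t := spliter.foldl
    (fun st line => students_sort_line line.toList 0 [] st.1 st.2.1 st.2.2)
    (([], [], []) : List (List Char) × List (List Char) × List (List Char))
  ((PySem.List.pyRange 0 (PySem.List.len t.1)).foldl
    (fun d x =>
      d.insert (String.ofList (PySem.List.pyGetD t.1 x []))
        (String.ofList (PySem.List.pyGetD t.2.1 x []),
         String.ofList (PySem.List.pyGetD t.2.2 x [])))
    (PySem.Dict.empty : PySem.Dict String (String × String))).items

-- ===== PORT B =====
def students_sort_alt (students : String) : List (String × String × String) :=
  ((PySem.Str.splitlines students).foldl
    (fun d line =>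
      let parts := PySem.Chars.splitOn line.toList [',']   -- line.split(',') (sep ≠ "", never raises)
      if 3 ≤ parts.length then
        d.insert (String.ofList (PySem.List.pyGetD parts 0 []))
          (String.ofList (PySem.List.pyGetD parts 1 []),
           String.ofList (PySem.Chars.join [] (PySem.List.slice parts (some 2) none)))
      else d)
    (PySem.Dict.empty : PySem.Dict String (String × String))).items

-- ===== PRECONDITION & SPEC =====
-- Pre_ excludes exactly the inputs where A raises IndexError: a line with exactly one comma
-- appends to student_ID but not to student_name, so the final zip loop goes out of range.
def Pre_students_sort (students : String) : Prop :=
  ∀ line ∈ PySem.Str.splitlines students, line.toList.count ',' ≠ 1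
instance (students : String) : Decidable (Pre_students_sort students) := by
  unfold Pre_students_sort; infer_instance
def pvWitness_students_sort : String := "1,Alice,Math\n2,Bob,CS"

def Spec_students_sort (students : String) (out : List (String × String × String)) : Prop :=
  out = students_sort_alt students
instance (students : String) (out : List (String × String × String)) :
    Decidable (Spec_students_sort students out) := by unfold Spec_students_sort; infer_instance

-- ===== CLAIM (what is proved, stated in full; the proofs are below) =====
def Claim_equal_students_sort : Prop := ∀ (students : String), Dom_students_sort students →
  Pre_students_sort students → Spec_students_sort students (students_sort students)

-- ===== LEMMAS AND PROOFS =====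

def modHead (c : Char) : List (List Char) → List (List Char)
  | [] => [[c]]
  | x :: xs => (c :: x) :: xs
def splitC : List Char → List (List Char)
  | [] => [[]]
  | c :: rest => if c = ',' then [] :: splitC rest else modHead c (splitC rest)

theorem splitC_ne_nil (cs : List Char) : splitC cs ≠ [] := by
  cases cs with
  | nil => simp [splitC]
  | cons c rest =>
    simp only [splitC]
    split
    · simp
    · cases h : splitC rest <;> simp [modHead]

theorem flatten_splitC (cs : List Char) :
    (splitC cs).flatten = cs.filter (fun x => !(x == ',')) := by
  induction cs with
  | nil => simp [splitC]
  | cons c rest ih =>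
    simp only [splitC]
    by_cases hc : c = ','
    · simp [hc, ih]
    · simp only [if_neg hc]
      cases h : splitC rest with
      | nil => exact absurd h (splitC_ne_nil rest)
      | cons x xs =>
        simp [modHead, List.filter_cons, hc, ← ih, h]

theorem length_splitC (cs : List Char) :
    (splitC cs).length = cs.count ',' + 1 := by
  induction cs with
  | nil => simp [splitC]
  | cons c rest ih =>
    simp only [splitC]
    by_cases hc : c = ','
    · simp [hc, ih]
    · simp only [if_neg hc]
      cases h : splitC rest with
      | nil => exact absurd h (splitC_ne_nil rest)
      | cons x xs =>
        simp [modHead, List.count_cons, hc, Ne.symm hc, ← ih, h]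

theorem splitOn_go_eq (fuel : Nat) (cs cur : List Char) (acc : List (List Char))
    (h : cs.length < fuel) :
    PySem.Chars.splitOn.go [','] fuel cs cur acc =
      acc.reverse ++ (match splitC cs with
        | [] => [cur.reverse]
        | p :: rest => (cur.reverse ++ p) :: rest) := by
  induction fuel generalizing cs cur acc with
  | zero => omega
  | succ n ih =>
    cases cs with
    | nil => simp [PySem.Chars.splitOn.go, splitC]
    | cons c rest =>
      by_cases hc : c = ','
      · subst hc
        rw [PySem.Chars.splitOn.go]
        simp only [List.isPrefixOf, BEq.rfl, Bool.true_and, List.isPrefixOf]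
        rw [if_pos (by simp [List.isPrefixOf])]
        simp only [List.length_cons] at h
        simp only [List.length_cons, List.length_nil, List.drop_succ_cons, List.drop_zero]
        rw [ih rest [] (cur.reverse :: acc) (by omega)]
        simp only [splitC, if_pos rfl]
        cases hs : splitC rest with
        | nil => exact absurd hs (splitC_ne_nil rest)
        | cons p ps => simp
      · rw [PySem.Chars.splitOn.go]
        rw [if_neg (by simp [List.isPrefixOf, hc]; exact fun h => absurd h.symm hc)]
        simp only [List.length_cons] at h
        rw [ih rest (c :: cur) acc (by omega)]
        simp only [splitC, if_neg hc]
        cases hs : splitC rest with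
        | nil => exact absurd hs (splitC_ne_nil rest)
        | cons p ps => simp [modHead]

theorem splitOn_eq_splitC (cs : List Char) :
    PySem.Chars.splitOn cs [','] = splitC cs := by
  rw [PySem.Chars.splitOn, splitOn_go_eq _ _ _ _ (by omega)]
  cases hs : splitC cs with
  | nil => exact absurd hs (splitC_ne_nil cs)
  | cons p ps => simp

theorem loop2 (cs : List Char) (h : cs ≠ []) (temp : List Char)
    (ids names cls : List (List Char)) :
    students_sort_line cs 2 temp ids names cls =
      (ids, names, cls ++ [temp ++ cs.filter (fun x => !(x == ','))]) := by
  induction cs generalizing temp cls with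
  | nil => exact absurd rfl h
  | cons c rest ih =>
    rw [students_sort_line.eq_def]
    by_cases hc : c = ','
    · subst hc
      norm_num
      cases rest with
      | nil => simp [students_sort_line]
      | cons d ds => simpa using ih (by simp) temp cls
    · norm_num [hc]
      cases rest with
      | nil => simp [students_sort_line, hc]
      | cons d ds =>
        have := ih (by simp) (temp ++ [c]) cls
        rw [this]
        simp

theorem loop1 (cs : List Char) (temp : List Char) (ids names cls : List (List Char)) :
    students_sort_line cs 1 temp ids names cls =
      (match splitC cs with
        | [] => (ids, names, cls)
        | [_] => (ids, names, cls)
        | p :: rest => (ids, names ++ [temp ++ p], cls ++ [rest.flatten])) := by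
  induction cs generalizing temp with
  | nil => simp [students_sort_line, splitC]
  | cons c rest ih =>
    rw [students_sort_line.eq_def]
    by_cases hc : c = ','
    · subst hc
      norm_num
      cases rest with
      | nil => simp [students_sort_line, splitC]
      | cons d ds =>
        rw [if_neg (List.cons_ne_nil d ds)]
        rw [loop2 (d :: ds) (by simp)]
        rw [← flatten_splitC]
        rw [show splitC (',' :: d :: ds) = [] :: splitC (d :: ds) from by
          simp [splitC]]
        cases hs : splitC (d :: ds) with
        | nil => exact absurd hs (splitC_ne_nil _)
        | cons p ps => simp
    · norm_num [hc]
      rw [ih]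
      simp only [splitC, if_neg hc]
      cases hs : splitC rest with
      | nil => exact absurd hs (splitC_ne_nil _)
      | cons p ps =>
        cases ps with
        | nil => simp [modHead]
        | cons q qs => simp [modHead]

theorem loop0 (cs : List Char) (temp : List Char) (ids names cls : List (List Char)) :
    students_sort_line cs 0 temp ids names cls =
      (match splitC cs with
        | [] => (ids, names, cls)
        | [_] => (ids, names, cls)
        | [p, _] => (ids ++ [temp ++ p], names, cls)
        | p :: q :: rest => (ids ++ [temp ++ p], names ++ [q], cls ++ [rest.flatten])) := by
  cases cs with
  | nil => simp [students_sort_line, splitC]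
  | cons c rest =>
    rw [students_sort_line.eq_def]
    by_cases hc : c = ','
    · subst hc
      norm_num
      rw [loop1]
      simp only [splitC, if_pos rfl]
      cases hs : splitC rest with
      | nil => exact absurd hs (splitC_ne_nil _)
      | cons p ps =>
        cases ps with
        | nil => simp
        | cons q qs => simp
    · norm_num [hc]
      rw [loop0]
      simp only [splitC, if_neg hc]
      cases hs : splitC rest with
      | nil => exact absurd hs (splitC_ne_nil _)
      | cons p ps =>
        cases ps with
        | nil => simp [modHead]
        | cons q qs => cases qs with
          | nil => simp [modHead]
          | cons r rs => simp [modHead]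

def lineT (line : String) : Option (List Char × List Char × List Char) :=
  match splitC line.toList with
  | p0 :: p1 :: p2 :: rest => some (p0, p1, (p2 :: rest).flatten)
  | _ => none

theorem join_nil_flatten (l : List (List Char)) : PySem.Chars.join [] l = l.flatten := by
  induction l with
  | nil => rfl
  | cons x xs ih =>
    cases xs with
    | nil => simp [PySem.Chars.join, List.intercalate]
    | cons y ys =>
      simp only [PySem.Chars.join, List.intercalate, List.intersperse] at ih ⊢
      simp [ih]

theorem foldA (lines : List String) (h : ∀ l ∈ lines, l.toList.count ',' ≠ 1)
    (ids names cls : List (List Char)) :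
    lines.foldl (fun st line => students_sort_line line.toList 0 [] st.1 st.2.1 st.2.2)
        (ids, names, cls) =
      (ids ++ (lines.filterMap lineT).map (·.1),
       names ++ (lines.filterMap lineT).map (·.2.1),
       cls ++ (lines.filterMap lineT).map (·.2.2)) := by
  induction lines generalizing ids names cls with
  | nil => simp
  | cons l ls ih =>
    have hl := h l (by simp)
    have hcnt : (splitC l.toList).length ≠ 2 := by
      rw [length_splitC]; omega
    simp only [List.foldl_cons]
    rw [loop0]
    cases hs : splitC l.toList with
    | nil => exact absurd hs (splitC_ne_nil _)
    | cons p ps =>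
      cases ps with
      | nil =>
        have ht : lineT l = none := by simp [lineT, hs]
        rw [ih (fun x hx => h x (by simp [hx]))]
        simp [List.filterMap_cons, ht]
      | cons q qs =>
        cases qs with
        | nil => rw [hs] at hcnt; simp at hcnt
        | cons r rs =>
          have ht : lineT l = some (p, q, (r :: rs).flatten) := by simp [lineT, hs]
          rw [ih (fun x hx => h x (by simp [hx]))]
          simp [List.filterMap_cons, ht]

theorem rangeLoop (T : List (List Char × List Char × List Char))
    (d : PySem.Dict String (String × String)) :
    (PySem.List.pyRange 0 (PySem.List.len (T.map (·.1)))).foldl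
      (fun d x =>
        d.insert (String.ofList (PySem.List.pyGetD (T.map (·.1)) x []))
          (String.ofList (PySem.List.pyGetD (T.map (·.2.1)) x []),
           String.ofList (PySem.List.pyGetD (T.map (·.2.2)) x []))) d =
    T.foldl (fun d t => d.insert (String.ofList t.1)
      (String.ofList t.2.1, String.ofList t.2.2)) d := by
  induction T using List.reverseRecOn with
  | nil => simp [PySem.List.len, PySem.List.pyRange]
  | append_singleton T t ih =>
    have hlen : PySem.List.len ((T ++ [t]).map (·.1)) = (T.length : Int) + 1 := by
      simp [PySem.List.len_eq]
    rw [hlen, PySem.List.pyRange_one_succ_right (by positivity), List.foldl_append]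
    have short : ∀ (f : (List Char × List Char × List Char) → List Char)
        (x : Int), 0 ≤ x → x < (T.length : Int) →
        PySem.List.pyGetD ((T ++ [t]).map f) x [] = PySem.List.pyGetD (T.map f) x [] := by
      intro f x h0 hx
      rw [PySem.List.pyGetD_eq_getElem _ _ h0 (by simp; omega),
          PySem.List.pyGetD_eq_getElem _ _ h0 (by simp; omega)]
      simp only [List.map_append]
      rw [List.getElem_append_left (by simp; omega)]
    have congr1 : (PySem.List.pyRange 0 (T.length : Int)).foldl
        (fun d x =>
          d.insert (String.ofList (PySem.List.pyGetD ((T ++ [t]).map (·.1)) x []))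
            (String.ofList (PySem.List.pyGetD ((T ++ [t]).map (·.2.1)) x []),
             String.ofList (PySem.List.pyGetD ((T ++ [t]).map (·.2.2)) x []))) d =
        (PySem.List.pyRange 0 (T.length : Int)).foldl
        (fun d x =>
          d.insert (String.ofList (PySem.List.pyGetD (T.map (·.1)) x []))
            (String.ofList (PySem.List.pyGetD (T.map (·.2.1)) x []),
             String.ofList (PySem.List.pyGetD (T.map (·.2.2)) x []))) d := by
      apply PySem.List.foldl_congr_mem
      intro acc x hx
      obtain ⟨h0, h1⟩ := PySem.List.mem_pyRange_one.1 hx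
      rw [short _ x h0 h1, short _ x h0 h1, short _ x h0 h1]
    have last : ∀ (f : (List Char × List Char × List Char) → List Char),
        PySem.List.pyGetD ((T ++ [t]).map f) (T.length : Int) [] = f t := by
      intro f
      rw [PySem.List.pyGetD_eq_getElem _ _ (by positivity) (by simp)]
      simp
    have hlen2 : PySem.List.len (T.map (·.1)) = (T.length : Int) := by
      simp [PySem.List.len_eq]
    rw [congr1]
    simp only [List.foldl_cons, List.foldl_nil]
    rw [last, last, last, List.foldl_append]
    rw [← hlen2, ih]
    simp

theorem foldB (lines : List String) (d : PySem.Dict String (String × String)) :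
    lines.foldl (fun d line =>
      let parts := PySem.Chars.splitOn line.toList [',']
      if 3 ≤ parts.length then
        d.insert (String.ofList (PySem.List.pyGetD parts 0 []))
          (String.ofList (PySem.List.pyGetD parts 1 []),
           String.ofList (PySem.Chars.join [] (PySem.List.slice parts (some 2) none)))
      else d) d =
    (lines.filterMap lineT).foldl (fun d t => d.insert (String.ofList t.1)
      (String.ofList t.2.1, String.ofList t.2.2)) d := by
  induction lines generalizing d with
  | nil => simp
  | cons l ls ih =>
    simp only [List.foldl_cons, List.filterMap_cons]
    rw [splitOn_eq_splitC]
    cases hs : splitC l.toList with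
    | nil => exact absurd hs (splitC_ne_nil _)
    | cons p ps =>
      cases ps with
      | nil =>
        have ht : lineT l = none := by simp [lineT, hs]
        simp only [ht]
        rw [if_neg (by simp)]
        exact ih d
      | cons q qs =>
        cases qs with
        | nil =>
          have ht : lineT l = none := by simp [lineT, hs]
          simp only [ht]
          rw [if_neg (by simp)]
          exact ih d
        | cons r rs =>
          have ht : lineT l = some (p, q, (r :: rs).flatten) := by simp [lineT, hs]
          simp only [ht]
          rw [if_pos (by simp)]
          have h0 : PySem.List.pyGetD (p :: q :: r :: rs) 0 [] = p := by
            simp [PySem.List.pyGetD]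
          have h1 : PySem.List.pyGetD (p :: q :: r :: rs) 1 [] = q := by
            have hnn : (0 : Int) ≤ (rs.length : Int) + 1 := by positivity
            simp [PySem.List.pyGetD, PySem.List.pyGet?, PySem.List.pyIdx?, hnn]
          have h2 : PySem.Chars.join []
              (PySem.List.slice (p :: q :: r :: rs) (some 2) none) = (r :: rs).flatten := by
            rw [show PySem.List.slice (p :: q :: r :: rs) (some 2) none = r :: rs from by
              simp [PySem.List.slice]]
            exact join_nil_flatten _
          rw [h0, h1, h2, ih]
          rfl

-- ===== VERDICT (by name: the statement is the Claim_ definition above) =====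
theorem students_sort_spec : Claim_equal_students_sort := by
  intro students _ hpre
  unfold Spec_students_sort students_sort students_sort_alt
  simp only []
  rw [foldA (PySem.Str.splitlines students) hpre [] [] []]
  simp only [List.nil_append]
  rw [rangeLoop, foldB]
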